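-- pv_equiv track=rewrite | github.com/LastDemon99/lumina-shader-graph | backend/src/agent_adk.py | _strip_instruction_noise
-- ===== SOURCE A (Python) =====
-- def _strip_instruction_noise(text: str) -> str:
--     """Remove sections that conflict with ADK tool-calling."""
--     src = str(text or "")
--     if not src.strip(): return ""
--     lower = src.lower()
--     cut_markers = ["# output format", "## output format", "output format", "# software_context"]
--     cut_at = None
--     for m in cut_markers:
--         idx = lower.find(m)
--         if idx >= 0: cut_at = idx if cut_at is None else min(cut_at, idx)
--     if cut_at is not None: src = src[:cut_at]
--     src = src.replace("{{SOFTWARE_CONTEXT}}", "").replace("{{AVAILABLE_NODES}}", "")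
--     return src.strip()
-- ===== SOURCE B (Python) =====
-- def _strip_instruction_noise(text: str) -> str:
--     """Remove sections that conflict with ADK tool-calling."""
--     src = str(text or "")
--     if not src.strip():
--         return ""
--     lower = src.lower()
--     markers = ("# output format", "## output format", "output format", "# software_context")
--     # single left-to-right scan: first position where any marker starts
--     cut = next((i for i in range(len(src)) if lower.startswith(markers, i)), None)
--     if cut is not None:
--         src = src[:cut]
--     src = src.replace("{{SOFTWARE_CONTEXT}}", "").replace("{{AVAILABLE_NODES}}", "")
--     return src.strip()
-- ===== Notes on version B (the rewrite author's own statement) =====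
-- stated objective: idiomatic
-- what changed: Replaces the marker-major loop of four .find calls with a running min by a single position-major scan that stops at the first index where any marker matches (str.startswith with a tuple and start offset).
import Mathlib
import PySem

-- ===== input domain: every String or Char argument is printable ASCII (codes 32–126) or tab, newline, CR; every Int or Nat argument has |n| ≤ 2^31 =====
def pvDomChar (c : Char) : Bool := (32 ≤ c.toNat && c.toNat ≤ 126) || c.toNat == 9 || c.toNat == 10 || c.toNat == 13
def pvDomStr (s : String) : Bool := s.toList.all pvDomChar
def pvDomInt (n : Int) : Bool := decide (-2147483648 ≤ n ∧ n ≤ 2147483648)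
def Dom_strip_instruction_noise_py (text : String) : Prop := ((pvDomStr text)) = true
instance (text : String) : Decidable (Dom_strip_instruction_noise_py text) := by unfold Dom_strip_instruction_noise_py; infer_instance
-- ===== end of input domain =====

-- B replaces A's marker-major loop (four .find calls with a running min) by a single
-- position-major scan stopping at the first index where any marker matches (idiomatic, same cost).

-- the cut markers, shared literal data of both programs
def pvMarkers : List (List Char) :=
  ["# output format".toList, "## output format".toList, "output format".toList, "# software_context".toList]

-- ===== PORT A =====
-- A's loop: for each marker take lower.find(m); keep the minimum nonnegative index.
def pvACut (lower : List Char) : Option Int :=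
  pvMarkers.foldl (fun cutAt m =>
    let idx := PySem.Chars.find lower m
    if 0 ≤ idx then
      some (match cutAt with | none => idx | some c => min c idx)
    else cutAt) none

-- `str(text or "")` is `text` for a str argument; truthiness of `src.strip()` is nonemptiness.
def strip_instruction_noise_py (text : String) : String :=
  if PySem.Chars.strip text.toList = [] then "" else
    String.ofList (PySem.Chars.strip
      (PySem.Chars.replace (PySem.Chars.replace
        (match pvACut (PySem.Chars.lower text.toList) with
          | none => text.toList
          | some c => PySem.List.slice text.toList none (some c))   -- src[:cut_at]
        "{{SOFTWARE_CONTEXT}}".toList [])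
        "{{AVAILABLE_NODES}}".toList []))

-- ===== PORT B =====
-- lower.startswith(markers, i) : does any marker start at position i?
def pvHit (suf : List Char) : Bool := pvMarkers.any (fun m => PySem.Chars.startswith suf m)

-- B's scan: first i in range(len(src)) with a marker match, else None.
def pvBScan : List Char → Nat → Option Nat
  | [], _ => none
  | c :: t, i => if pvHit (c :: t) then some i else pvBScan t (i + 1)

def strip_instruction_noise_py_alt (text : String) : String :=
  if PySem.Chars.strip text.toList = [] then "" else
    String.ofList (PySem.Chars.strip
      (PySem.Chars.replace (PySem.Chars.replace
        (match pvBScan (PySem.Chars.lower text.toList) 0 with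
          | none => text.toList
          | some k => text.toList.take k)   -- src[:cut] with cut = k ≥ 0
        "{{SOFTWARE_CONTEXT}}".toList [])
        "{{AVAILABLE_NODES}}".toList []))

-- ===== PRECONDITION & SPEC =====
def Spec_strip_instruction_noise_py (text : String) (out : String) : Prop := out = strip_instruction_noise_py_alt text
instance (text : String) (out : String) : Decidable (Spec_strip_instruction_noise_py text out) := by unfold Spec_strip_instruction_noise_py; infer_instance

-- ===== CLAIM (what is proved, stated in full; the proofs are below) =====
def Claim_equal_strip_instruction_noise_py : Prop := ∀ (text : String), Dom_strip_instruction_noise_py text → Spec_strip_instruction_noise_py text (strip_instruction_noise_py text)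

-- ===== LEMMAS AND PROOFS =====

-- no marker matches the empty suffix
theorem pvHit_nil : pvHit [] = false := by decide

-- B's scan returns none iff no position hits
theorem pvBScan_none (s : List Char) (i : Nat) :
    pvBScan s i = none ↔ ∀ j, pvHit (s.drop j) = false := by
  induction s generalizing i with
  | nil => simp [pvBScan, pvHit_nil]
  | cons c t ih =>
    by_cases h : pvHit (c :: t) = true
    · simp [pvBScan, h]
      exact ⟨0, by simpa using h⟩
    · simp only [Bool.not_eq_true] at h
      constructor
      · intro hn j
        cases j with
        | zero => simpa using h
        | succ j =>
          have := (ih (i + 1)).mp (by simpa [pvBScan, h] using hn)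
          simpa using this j
      · intro hall
        have : pvBScan t (i + 1) = none := (ih (i + 1)).mpr (fun j => by simpa using hall (j + 1))
        simpa [pvBScan, h] using this

-- B's scan returns the least hit position (offset by i)
theorem pvBScan_some (s : List Char) (i k : Nat) (h : pvBScan s i = some k) :
    ∃ j, k = i + j ∧ pvHit (s.drop j) = true ∧ ∀ j' < j, pvHit (s.drop j') = false := by
  induction s generalizing i with
  | nil => simp [pvBScan] at h
  | cons c t ih =>
    by_cases hh : pvHit (c :: t) = true
    · refine ⟨0, ?_, by simpa using hh, by omega⟩
      simp [pvBScan, hh] at h; omega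
    · simp only [Bool.not_eq_true] at hh
      have h' : pvBScan t (i + 1) = some k := by simpa [pvBScan, hh] using h
      obtain ⟨j, hk, hhit, hleast⟩ := ih (i + 1) h'
      refine ⟨j + 1, by omega, by simpa using hhit, ?_⟩
      intro j' hj'
      cases j' with
      | zero => simpa using hh
      | succ j' => simpa using hleast j' (by omega)

-- hit at j ↔ some marker is a prefix of the suffix at j
theorem pvHit_iff (s : List Char) (j : Nat) :
    pvHit (s.drop j) = true ↔ ∃ m ∈ pvMarkers, m <+: s.drop j := by
  simp [pvHit, List.any_eq_true]
  constructor
  · rintro ⟨m, hm, hp⟩; exact ⟨m, hm, (PySem.Chars.startswith_iff _ _).mp hp⟩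
  · rintro ⟨m, hm, hp⟩; exact ⟨m, hm, (PySem.Chars.startswith_iff _ _).mpr hp⟩

-- A's fold returns none iff every find came back -1
theorem pvFold_none (lower : List Char) (ms : List (List Char)) (acc : Option Int) :
    (ms.foldl (fun cutAt m =>
      let idx := PySem.Chars.find lower m
      if 0 ≤ idx then
        some (match cutAt with | none => idx | some c => min c idx)
      else cutAt) acc) = none ↔ acc = none ∧ ∀ m ∈ ms, ¬ 0 ≤ PySem.Chars.find lower m := by
  induction ms generalizing acc with
  | nil => simp
  | cons m ms ih =>
    by_cases h : 0 ≤ PySem.Chars.find lower m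
    · simp only [List.foldl_cons, h, if_pos]
      rw [ih]
      simp [h]
    · simp only [List.foldl_cons, h]
      rw [ih]
      constructor
      · rintro ⟨ha, hall⟩
        refine ⟨ha, fun m' hm' => ?_⟩
        rcases List.mem_cons.mp hm' with rfl | hm'
        · exact h
        · exact hall m' hm' 
      · rintro ⟨ha, hall⟩; exact ⟨ha, fun m' hm' => hall m' (List.mem_cons_of_mem _ hm')⟩

-- A's fold returns the minimum of acc and the nonnegative finds
theorem pvFold_some (lower : List Char) (ms : List (List Char)) (acc : Option Int) (c : Int)
    (h : (ms.foldl (fun cutAt m =>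
      let idx := PySem.Chars.find lower m
      if 0 ≤ idx then
        some (match cutAt with | none => idx | some c => min c idx)
      else cutAt) acc) = some c) :
    (acc = some c ∨ ∃ m ∈ ms, PySem.Chars.find lower m = c ∧ 0 ≤ c)
    ∧ (∀ d, acc = some d → c ≤ d)
    ∧ (∀ m ∈ ms, 0 ≤ PySem.Chars.find lower m → c ≤ PySem.Chars.find lower m) := by
  induction ms generalizing acc with
  | nil =>
    simp at h
    exact ⟨Or.inl h, by rintro d hd; rw [h] at hd; exact le_of_eq (Option.some.inj hd), by simp⟩
  | cons m ms ih =>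
    by_cases hm : 0 ≤ PySem.Chars.find lower m
    · simp only [List.foldl_cons, hm, if_pos] at h
      obtain ⟨hmem, hacc, hrest⟩ := ih _ h
      rcases hmem with heq | ⟨m', hm', hf, hc⟩
      · -- c is the new accumulator value: idx or min a idx
        cases acc with
        | none =>
          simp at heq
          refine ⟨Or.inr ⟨m, by simp, heq, heq ▸ hm⟩, by simp, ?_⟩
          intro m' hm' hf'
          rcases List.mem_cons.mp hm' with rfl | hm'
          · omega
          · exact hrest m' hm' hf'
        | some a =>
          simp at heq
          have hle : c ≤ a ∧ c ≤ PySem.Chars.find lower m := by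
            constructor <;> simp [← heq]
          by_cases hca : c = a
          · refine ⟨Or.inl (by rw [hca]), ?_, ?_⟩
            · rintro d hd; cases hd; exact hle.1
            · intro m' hm' hf'
              rcases List.mem_cons.mp hm' with rfl | hm'
              · exact hle.2
              · exact hrest m' hm' hf'
          · have : c = PySem.Chars.find lower m := by omega
            refine ⟨Or.inr ⟨m, by simp, this.symm, this ▸ hm⟩, ?_, ?_⟩
            · rintro d hd; cases hd; exact hle.1
            · intro m' hm' hf'
              rcases List.mem_cons.mp hm' with rfl | hm'
              · exact hle.2
              · exact hrest m' hm' hf'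
      · refine ⟨Or.inr ⟨m', List.mem_cons_of_mem _ hm', hf, hc⟩, ?_, ?_⟩
        · intro d hd
          have := hacc (match acc with | none => PySem.Chars.find lower m | some a => min a (PySem.Chars.find lower m))
          cases acc with
          | none => simp at hd
          | some a =>
            cases hd
            have := hacc (min d (PySem.Chars.find lower m)) (by simp)
            omega
        · intro m'' hm'' hf''
          rcases List.mem_cons.mp hm'' with rfl | hm''
          · have := hacc (match acc with | none => PySem.Chars.find lower m'' | some a => min a (PySem.Chars.find lower m'')) (by cases acc <;> simp)
            cases acc with
            | none => simpa using this
            | some a => simp at this; omega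
          · exact hrest m'' hm'' hf''
    · simp only [List.foldl_cons, hm] at h
      obtain ⟨hmem, hacc, hrest⟩ := ih _ h
      refine ⟨?_, hacc, ?_⟩
      · rcases hmem with h' | ⟨m', hm', hf, hc⟩
        · exact Or.inl h'
        · exact Or.inr ⟨m', List.mem_cons_of_mem _ hm', hf, hc⟩
      · intro m' hm' hf'
        rcases List.mem_cons.mp hm' with rfl | hm'
        · exact absurd hf' hm
        · exact hrest m' hm' hf'

-- a marker prefixes the suffix at j iff its find is nonneg and find ≤ j is forced
theorem pvFind_le_of_prefix (lower m : List Char) (j : Nat) (h : m <+: lower.drop j) :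
    0 ≤ PySem.Chars.find lower m ∧ (PySem.Chars.find lower m).toNat ≤ j := by
  have hin : PySem.Chars.isIn m lower = true :=
    (PySem.Chars.exists_prefix_drop_iff_isIn _ _).mp ⟨j, h⟩
  have hnn : 0 ≤ PySem.Chars.find lower m :=
    (PySem.Chars.find_nonneg_iff _ _).mpr ((PySem.Chars.isIn_iff_infix _ _).mp hin)
  obtain ⟨_, hmin⟩ := PySem.Chars.find_spec (s := lower) (sub := m) hnn
  refine ⟨hnn, ?_⟩
  by_contra hlt
  exact hmin j (by omega) h

-- the two cut computations agree
theorem pvCut_eq (lower : List Char) :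
    pvACut lower = (pvBScan lower 0).map (fun k => (k : Int)) := by
  cases hB : pvBScan lower 0 with
  | none =>
    have hall := (pvBScan_none lower 0).mp hB
    rw [pvACut, (pvFold_none lower pvMarkers none).mpr]
    · rfl
    refine ⟨rfl, fun m hm hnn => ?_⟩
    obtain ⟨hpre, _⟩ := PySem.Chars.find_spec (s := lower) (sub := m) hnn
    have : pvHit (lower.drop (PySem.Chars.find lower m).toNat) = true :=
      (pvHit_iff _ _).mpr ⟨m, hm, hpre⟩
    rw [hall _] at this; exact absurd this (by simp)
  | some k =>
    obtain ⟨j, hkj, hhit, hleast⟩ := pvBScan_some lower 0 k hB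
    have hkj' : k = j := by omega
    subst hkj'
    obtain ⟨m, hm, hpre⟩ := (pvHit_iff _ _).mp hhit
    have hfm := pvFind_le_of_prefix lower m k hpre
    cases hA : pvACut lower with
    | none =>
      rw [pvACut] at hA
      obtain ⟨_, hall⟩ := (pvFold_none lower pvMarkers none).mp hA
      exact absurd hfm.1 (hall m hm)
    | some c =>
      rw [pvACut] at hA
      obtain ⟨hmem, _, hmin⟩ := pvFold_some lower pvMarkers none c hA
      rcases hmem with h' | ⟨m', hm', hf, hc⟩
      · simp at h'
      · -- c = find lower m' with 0 ≤ c; m' prefixes drop c.toNat, and forall i < c.toNat no prefix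
        obtain ⟨hpre', hmin'⟩ := PySem.Chars.find_spec (s := lower) (sub := m') (hf ▸ hc)
        rw [hf] at hpre' hmin'
        -- c.toNat is a hit position, so k ≤ c.toNat by B-leastness
        have hhitc : pvHit (lower.drop c.toNat) = true := (pvHit_iff _ _).mpr ⟨m', hm', hpre'⟩
        have h1 : k ≤ c.toNat := by
          by_contra hlt
          rw [hleast c.toNat (by omega)] at hhitc; exact absurd hhitc (by simp)
        -- c ≤ find lower m ≤ k by A-minimality
        have h2 : c ≤ PySem.Chars.find lower m := hmin m hm hfm.1
        have : c.toNat ≤ k := by omega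
        have : c = (k : Int) := by omega
        simp [this]

-- ===== VERDICT (by name: the statement is the Claim_ definition above) =====
theorem strip_instruction_noise_py_spec : Claim_equal_strip_instruction_noise_py := by
  intro text _
  unfold Spec_strip_instruction_noise_py strip_instruction_noise_py strip_instruction_noise_py_alt
  rw [pvCut_eq]
  cases hB : pvBScan (PySem.Chars.lower text.toList) 0 with
  | none => rfl
  | some k =>
    have h0 : (0 : Int) ≤ (k : Int) := Int.natCast_nonneg k
    simp [PySem.List.slice_to text.toList h0]
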